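-- pv_equiv track=rewrite | github.com/LenX21/jobeasy-algorithms-course | algorithms_elena/hw4/irregular_string.py | remove_space
-- ===== SOURCE A (Python) =====
-- def remove_space(s):
--     import string
--     word = ''
--     result = []
--     for i in range(len(s)):
--         ele = s[i]
--         if ele.isalpha() or ele in string.punctuation:
--             word += ele
--             if i == len(s)-1:
--                 result.append(word)
--             continue
--         if word:
--             result.append(word)
--             word = ''
--     return ' '.join(result)
-- ===== SOURCE B (Python) =====
-- def remove_space(s):
--     import string
--     punct = string.punctuation
--     words = []
--     n = len(s)
--     i = 0
--     while i < n:
--         if s[i].isalpha() or s[i] in punct: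
--             j = i + 1
--             while j < n and (s[j].isalpha() or s[j] in punct):
--                 j += 1
--             words.append(s[i:j])
--             i = j
--         else:
--             i += 1
--     return ' '.join(words)
-- ===== Notes on version B (the rewrite author's own statement) =====
-- stated objective: alternative
-- what changed: Replaces A's per-character accumulator with a special last-index flush by a two-pointer scan that finds each maximal run of word characters and slices it out whole, avoiding character-by-character string concatenation; no pending word or end-of-string case exists.
import Mathlib
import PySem

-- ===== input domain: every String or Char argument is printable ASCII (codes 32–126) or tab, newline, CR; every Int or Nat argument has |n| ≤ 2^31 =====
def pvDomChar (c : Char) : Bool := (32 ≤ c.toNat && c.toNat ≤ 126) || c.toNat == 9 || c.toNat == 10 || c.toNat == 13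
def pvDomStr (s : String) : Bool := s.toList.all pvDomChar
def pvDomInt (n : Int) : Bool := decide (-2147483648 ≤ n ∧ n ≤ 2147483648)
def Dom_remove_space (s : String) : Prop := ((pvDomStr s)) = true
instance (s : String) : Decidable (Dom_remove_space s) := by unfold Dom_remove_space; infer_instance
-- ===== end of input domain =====

-- B replaces A's char-by-char accumulator with a last-index flush by a two-pointer
-- scan that extracts each maximal run of word characters whole (alternative decomposition).

-- ===== PORT A =====
-- string.punctuation (ASCII)
def pvPunct : List Char :=
  ['!', '"', '#', '$', '%', '&', '\'', '(', ')', '*', '+', ',', '-', '.', '/',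
   ':', ';', '<', '=', '>', '?', '@', '[', '\\', ']', '^', '_', '`', '{', '|', '}', '~']

-- ele.isalpha() or ele in string.punctuation
def pvIsWord (c : Char) : Bool := PySem.Chars.isalpha c || pvPunct.contains c

-- one iteration of A's for-loop body (state = (word, result), i the index)
def pvStepA (cs : List Char) (st : List Char × List (List Char)) (i : Int) :
    List Char × List (List Char) :=
  let ele := PySem.List.pyGetD cs i ' '
  if pvIsWord ele then
    let word := st.1 ++ [ele]
    if i == PySem.List.len cs - 1 then (word, st.2 ++ [word]) else (word, st.2)
  else
    if !st.1.isEmpty then ([], st.2 ++ [st.1]) else st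

def remove_space (s : String) : String :=
  let cs := s.toList
  let st := (PySem.List.pyRange 0 (PySem.List.len cs)).foldl (pvStepA cs) ([], [])
  PySem.Str.join " " (st.2.map String.ofList)

-- ===== PORT B =====
-- the same predicate, written from string.punctuation as the literal Python string
def pvWordB (c : Char) : Bool :=
  PySem.Chars.isalpha c || ("!\"#$%&'()*+,-./:;<=>?@[\\]^_`{|}~".toList.contains c)

-- the outer while loop of B; its inner while (advancing j over the run) is the
-- takeWhile/dropWhile pair, and the else-branch is the step to the next character
def pvRuns : List Char → List (List Char)
  | [] => []
  | c :: t =>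
    if pvWordB c then (c :: t.takeWhile pvWordB) :: pvRuns (t.dropWhile pvWordB)
    else pvRuns t
termination_by l => l.length
decreasing_by
  · simpa using Nat.lt_succ_of_le (List.length_dropWhile_le _ _)
  · simp

def remove_space_alt (s : String) : String :=
  PySem.Str.join " " ((pvRuns s.toList).map String.ofList)

-- ===== PRECONDITION & SPEC =====
def Spec_remove_space (s : String) (out : String) : Prop := out = remove_space_alt s
instance (s : String) (out : String) : Decidable (Spec_remove_space s out) := by unfold Spec_remove_space; infer_instance

-- ===== CLAIM (what is proved, stated in full; the proofs are below) =====
def Claim_equal_remove_space : Prop := ∀ (s : String), Dom_remove_space s → Spec_remove_space s (remove_space s)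

-- ===== LEMMAS AND PROOFS =====

-- the two predicates agree (string.punctuation as a char list vs as a string literal)
lemma pvWordB_eq (c : Char) : pvWordB c = pvIsWord c := by
  have h : ("!\"#$%&'()*+,-./:;<=>?@[\\]^_`{|}~".toList) = pvPunct := by decide
  simp [pvWordB, pvIsWord, h]

-- proof-side bridge: A's pending word threaded through the rest of the string
def pvRunsP (word : List Char) : List Char → List (List Char)
  | [] => if word.isEmpty then [] else [word]
  | c :: r =>
    if pvIsWord c then pvRunsP (word ++ [c]) r
    else if word.isEmpty then pvRunsP [] r else word :: pvRunsP [] r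

lemma pvRunsP_spec : ∀ (t : List Char) (word : List Char),
    pvRunsP word t =
      if word.isEmpty then pvRuns t
      else (word ++ t.takeWhile pvWordB) :: pvRuns (t.dropWhile pvWordB) := by
  intro t
  induction t with
  | nil =>
    intro word
    cases h : word.isEmpty <;> simp [pvRunsP, pvRuns, h]
  | cons c r ih =>
    intro word
    rcases hw : pvIsWord c with _ | _
    · have hB : pvWordB c = false := by rw [pvWordB_eq, hw]
      cases h : word.isEmpty
      · simp [pvRunsP, hw, h, ih, pvRuns, hB]
      · simp [pvRunsP, hw, h, ih, pvRuns, hB]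
    · have hB : pvWordB c = true := by rw [pvWordB_eq, hw]
      have hne : (word ++ [c]).isEmpty = false := by simp
      cases h : word.isEmpty
      · simp [pvRunsP, hw, ih, hB, hne]
      · have hwe : word = [] := List.isEmpty_iff.mp h
        subst hwe
        simp [pvRunsP, hw, ih, pvRuns, hB]

-- the key invariant: A's remaining loop on the nonempty suffix t of cs starting
-- at index a yields result ++ pvRunsP word t
lemma pvKey (cs : List Char) (t : List Char) :
    ∀ (a : Int) (word : List Char) (result : List (List Char)),
    t ≠ [] → 0 ≤ a → List.drop a.toNat cs = t → a.toNat + t.length = cs.length →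
    ((PySem.List.pyRange a (PySem.List.len cs)).foldl (pvStepA cs) (word, result)).2
      = result ++ pvRunsP word t := by
  induction t with
  | nil => intro a word result hne; exact absurd rfl hne
  | cons c rest ih =>
    intro a word result _ ha hdrop hlen
    simp only [List.length_cons] at hlen
    have hlt : a < PySem.List.len cs := by simp only [PySem.List.len]; omega
    have hget : PySem.List.pyGetD cs a ' ' = c := by
      have h0 : cs[a.toNat]? = some c := by
        have h1 := List.getElem?_drop (xs := cs) (i := a.toNat) (j := 0)
        rw [hdrop] at h1
        exact Option.mem_def.mp (id (Eq.symm h1))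
      rw [PySem.List.pyGetD_of_nonneg cs ' ' ha]
      simp [List.getD_eq_getElem?_getD, h0]
    have hdrop' : List.drop (a + 1).toNat cs = rest := by
      have h2 : List.drop 1 (List.drop a.toNat cs) = rest := by rw [hdrop]; rfl
      rw [List.drop_drop] at h2
      have : (a + 1).toNat = a.toNat + 1 := by omega
      rw [this]
      simpa [Nat.add_comm] using h2
    rw [PySem.List.pyRange_one_cons hlt, List.foldl_cons]
    rcases hw : pvIsWord c with _ | _
    · -- non-word character
      rcases hword : word.isEmpty with _ | _
      · -- word nonempty: flush it
        have hstep : pvStepA cs (word, result) a = ([], result ++ [word]) := by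
          simp [pvStepA, hget, hw, hword]
        rw [hstep]
        rcases hrest : rest with _ | ⟨d, rest'⟩
        · subst hrest
          have hend : PySem.List.pyRange (a + 1) (PySem.List.len cs) = [] :=
            PySem.List.pyRange_one_eq_nil (by simp only [PySem.List.len]; simp at hlen; omega)
          rw [hend]
          simp [pvRunsP, hw, hword]
        · rw [ih (a + 1) [] (result ++ [word]) (by simp [hrest]) (by omega)
              (by rw [hdrop']) (by simp [hrest] at hlen ⊢; omega)]
          simp [pvRunsP, hw, hword, hrest]
      · -- word empty: nothing to flush
        have hwe : word = [] := List.isEmpty_iff.mp hword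
        subst hwe
        have hstep : pvStepA cs ([], result) a = ([], result) := by
          simp [pvStepA, hget, hw]
        rw [hstep]
        rcases hrest : rest with _ | ⟨d, rest'⟩
        · subst hrest
          have hend : PySem.List.pyRange (a + 1) (PySem.List.len cs) = [] :=
            PySem.List.pyRange_one_eq_nil (by simp only [PySem.List.len]; simp at hlen; omega)
          rw [hend]
          simp [pvRunsP, hw]
        · rw [ih (a + 1) [] result (by simp [hrest]) (by omega)
              (by rw [hdrop']) (by simp [hrest] at hlen ⊢; omega)]
          simp [pvRunsP, hw, hrest]
    · -- word character: append to the current word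
      rcases hrest : rest with _ | ⟨d, rest'⟩
      · -- last character of the string
        subst hrest
        have hbeq : a = PySem.List.len cs - 1 := by
          simp only [PySem.List.len]
          simp at hlen
          omega
        have hstep : pvStepA cs (word, result) a
            = (word ++ [c], result ++ [word ++ [c]]) := by
          simp only [pvStepA, hget, hw]
          simp [hbeq]
        rw [hstep]
        have hend : PySem.List.pyRange (a + 1) (PySem.List.len cs) = [] :=
          PySem.List.pyRange_one_eq_nil (by simp only [PySem.List.len]; simp at hlen; omega)
        rw [hend]
        simp [pvRunsP, hw]
      · -- not the last character
        have hbeq : ¬ (a = (cs.length : Int) - 1) := by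
          simp [hrest] at hlen
          omega
        have hstep : pvStepA cs (word, result) a = (word ++ [c], result) := by
          simp only [pvStepA, hget, hw]
          simp [hbeq]
        rw [hstep]
        rw [ih (a + 1) (word ++ [c]) result (by simp [hrest]) (by omega)
            (by rw [hdrop']) (by simp [hrest] at hlen ⊢; omega)]
        simp [pvRunsP, hw, hrest]

-- ===== VERDICT (by name: the statement is the Claim_ definition above) =====
theorem remove_space_spec : Claim_equal_remove_space := by
  intro s _
  unfold Spec_remove_space remove_space remove_space_alt
  rcases hcs : s.toList with _ | ⟨c, t⟩
  · simp [PySem.List.len, PySem.List.pyRange, pvRuns]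
  · have h := pvKey s.toList (c :: t) 0 [] [] (by simp) (by omega) (by simp [hcs]) (by simp [hcs])
    rw [hcs] at h
    dsimp only
    rw [h, pvRunsP_spec]
    simp
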